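-- pv_equiv track=rewrite | github.com/koytze/learn_python | list1.py | StartZ
-- ===== SOURCE A (Python) =====
-- def StartZ(lst):
--     lst1 = []
--     lst2 = []
--     for element in lst:
--         if element[0] == 'z':
--             lst1.append(element)
--             lst1.sort()
--
--         else:
--             lst2.append(element)
--             lst2.sort()
--     lst = lst1+lst2
--     #fill in your code here
--     return lst
-- ===== SOURCE B (Python) =====
-- def StartZ(lst):
--     zs = sorted(e for e in lst if e[0] == 'z')
--     others = sorted(e for e in lst if e[0] != 'z')
--     return zs + others
-- ===== Notes on version B (the rewrite author's own statement) =====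
-- stated objective: faster
-- what changed: B replaces A's single loop that appends each element to one of two accumulators and re-sorts that accumulator after every append with two filters and one sorted() call per group.
import Mathlib
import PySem

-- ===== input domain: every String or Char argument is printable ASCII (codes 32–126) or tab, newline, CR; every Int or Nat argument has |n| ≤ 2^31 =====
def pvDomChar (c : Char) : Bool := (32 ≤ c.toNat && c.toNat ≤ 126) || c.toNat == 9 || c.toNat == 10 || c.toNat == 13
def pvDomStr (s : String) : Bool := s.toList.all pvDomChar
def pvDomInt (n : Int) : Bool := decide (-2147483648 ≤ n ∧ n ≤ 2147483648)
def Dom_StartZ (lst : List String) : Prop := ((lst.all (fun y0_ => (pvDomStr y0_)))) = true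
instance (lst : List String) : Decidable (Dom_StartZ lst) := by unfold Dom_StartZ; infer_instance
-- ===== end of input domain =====

-- B replaces A's per-element append-then-re-sort loop over two accumulators with two filters and one sort per group (faster).

-- ===== PORT A =====
-- A: one loop; each element is appended to lst1 (first char 'z') or lst2, and that list is re-sorted after every append.
def StartZ (lst : List String) : List String :=
  let r := lst.foldl
    (fun (acc : List String × List String) e =>
      if PySem.Str.pyGet? e 0 == some 'z' then
        (PySem.List.sorted (acc.1 ++ [e]) (fun x => x) false, acc.2)
      else
        (acc.1, PySem.List.sorted (acc.2 ++ [e]) (fun x => x) false))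
    ([], [])
  r.1 ++ r.2

-- ===== PORT B =====
def StartZ_alt (lst : List String) : List String :=
  PySem.List.sorted (lst.filter (fun e => PySem.Str.pyGet? e 0 == some 'z')) (fun x => x) false
  ++ PySem.List.sorted (lst.filter (fun e => !(PySem.Str.pyGet? e 0 == some 'z'))) (fun x => x) false

-- ===== PRECONDITION & SPEC =====
-- Pre_ excludes lists containing an empty string: there Python's element[0] raises IndexError in A (and in B).
def Pre_StartZ (lst : List String) : Prop := ∀ s ∈ lst, s ≠ ""
instance (lst : List String) : Decidable (Pre_StartZ lst) := by unfold Pre_StartZ; infer_instance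
def pvWitness_StartZ : List String := ["zoo", "apple", "zebra", "b"]
def Spec_StartZ (lst : List String) (out : List String) : Prop := out = StartZ_alt lst
instance (lst : List String) (out : List String) : Decidable (Spec_StartZ lst out) := by unfold Spec_StartZ; infer_instance

-- ===== CLAIM (what is proved, stated in full; the proofs are below) =====
def Claim_equal_StartZ : Prop := ∀ (lst : List String), Dom_StartZ lst → Pre_StartZ lst → Spec_StartZ lst (StartZ lst)

-- ===== LEMMAS AND PROOFS =====

-- re-sorting after an append equals sorting the unsorted accumulator plus the element
theorem sorted_append_sorted (l : List String) (e : String) :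
    PySem.List.sorted (PySem.List.sorted l (fun x => x) false ++ [e]) (fun x => x) false
      = PySem.List.sorted (l ++ [e]) (fun x => x) false := by
  exact PySem.List.sorted_eq_sorted_of_perm _ _ _ Function.injective_id
    (List.Perm.append_right [e] (PySem.List.sorted_perm l _ _))

-- loop invariant: A's fold over two sorted accumulators yields the sorts of the filtered extensions
theorem StartZ_loop (lst l1 l2 : List String) :
    lst.foldl
      (fun (acc : List String × List String) e =>
        if PySem.Str.pyGet? e 0 == some 'z' then
          (PySem.List.sorted (acc.1 ++ [e]) (fun x => x) false, acc.2)
        else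
          (acc.1, PySem.List.sorted (acc.2 ++ [e]) (fun x => x) false))
      (PySem.List.sorted l1 (fun x => x) false, PySem.List.sorted l2 (fun x => x) false)
    = (PySem.List.sorted (l1 ++ lst.filter (fun e => PySem.Str.pyGet? e 0 == some 'z')) (fun x => x) false,
       PySem.List.sorted (l2 ++ lst.filter (fun e => !(PySem.Str.pyGet? e 0 == some 'z'))) (fun x => x) false) := by
  induction lst generalizing l1 l2 with
  | nil => simp
  | cons e rest ih =>
    by_cases h : (PySem.Str.pyGet? e 0 == some 'z') = true
    · simp only [List.foldl_cons, h, List.filter_cons, Bool.not_true, if_true]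
      rw [sorted_append_sorted]
      have := ih (l1 ++ [e]) l2
      simp only [List.append_assoc, List.singleton_append] at this ⊢
      simpa using this
    · simp only [List.foldl_cons, h, List.filter_cons]
      rw [if_neg (by simp [h]), sorted_append_sorted]
      have := ih l1 (l2 ++ [e])
      simp only [List.append_assoc, List.singleton_append] at this ⊢
      simpa using this

-- ===== VERDICT (by name: the statement is the Claim_ definition above) =====
theorem StartZ_spec : Claim_equal_StartZ := by
  intro lst _ _
  unfold Spec_StartZ StartZ StartZ_alt
  dsimp only
  rw [show (([], []) : List String × List String)
        = (PySem.List.sorted ([] : List String) (fun x => x) false,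
           PySem.List.sorted ([] : List String) (fun x => x) false) from rfl,
      StartZ_loop]
  simp
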